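-- pv_equiv track=rewrite | github.com/abd2re/questions-infos | 14.py | MMSL
-- ===== SOURCE A (Python) =====
-- def MMSL(arr:list):
--     maxarr,minarr = arr.copy(), arr.copy()
--     for i in range(len(arr)-1):
--         if maxarr[i] > maxarr[i+1]:
--             maxarr[i+1] = maxarr[i]
--         if minarr[i] < minarr[i+1]:
--             minarr[i+1] = minarr[i]
--     return f'max : {maxarr[-1]}, min : {minarr[-1]}'
-- ===== SOURCE B (Python) =====
-- def MMSL(arr: list):
--     s = sorted(arr)
--     return f'max : {s[-1]}, min : {s[0]}'
-- ===== Notes on version B (the rewrite author's own statement) =====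
-- stated objective: simpler
-- what changed: B sorts the list once with the built-in sorted() and reads the two endpoints of the sorted copy instead of A's two in-place prefix-propagation passes over index pairs.
import Mathlib
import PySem

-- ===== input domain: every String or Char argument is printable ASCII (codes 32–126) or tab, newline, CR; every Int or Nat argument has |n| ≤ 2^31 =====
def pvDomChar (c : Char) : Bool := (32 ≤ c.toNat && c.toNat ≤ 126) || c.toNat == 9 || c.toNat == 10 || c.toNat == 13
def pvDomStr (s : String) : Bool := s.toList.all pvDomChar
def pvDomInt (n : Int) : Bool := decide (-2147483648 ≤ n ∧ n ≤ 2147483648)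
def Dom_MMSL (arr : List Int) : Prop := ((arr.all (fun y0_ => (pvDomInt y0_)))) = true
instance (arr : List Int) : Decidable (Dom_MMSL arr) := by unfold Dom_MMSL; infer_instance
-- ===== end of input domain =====

-- B sorts the list once and reads the two endpoints instead of A's two prefix-propagation passes over index pairs (objective: simpler).


-- ===== PORT A =====
-- single loop over i in range(len(arr)-1) carrying the pair (maxarr, minarr);
-- all indices i, i+1 accessed by the loop are in range, so pyGetD is exact there;
-- the final maxarr[-1] raises IndexError on the empty list (excluded by Pre_).
def MMSL (arr : List Int) : String :=
  let st :=
    (PySem.List.pyRange 0 ((arr.length : Int) - 1)).foldl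
      (fun (st : List Int × List Int) i =>
        ((if PySem.List.pyGetD st.1 i 0 > PySem.List.pyGetD st.1 (i + 1) 0
            then st.1.set (i + 1).toNat (PySem.List.pyGetD st.1 i 0) else st.1),
         (if PySem.List.pyGetD st.2 i 0 < PySem.List.pyGetD st.2 (i + 1) 0
            then st.2.set (i + 1).toNat (PySem.List.pyGetD st.2 i 0) else st.2)))
      (arr, arr)
  "max : " ++ PySem.Int.toStr (PySem.List.pyGetD st.1 (-1) 0) ++ ", min : "
    ++ PySem.Int.toStr (PySem.List.pyGetD st.2 (-1) 0)

-- ===== PORT B =====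
-- s = sorted(arr); s[-1] and s[0] raise IndexError on the empty list (excluded by Pre_),
-- so pyGetD is exact there.
def MMSL_alt (arr : List Int) : String :=
  let s := PySem.List.sorted arr (fun x => x)
  "max : " ++ PySem.Int.toStr (PySem.List.pyGetD s (-1) 0) ++ ", min : "
    ++ PySem.Int.toStr (PySem.List.pyGetD s 0 0)

-- ===== PRECONDITION & SPEC =====
-- On the empty list both A and B raise IndexError (arr[-1] of an empty list), so it is excluded.
def Pre_MMSL (arr : List Int) : Prop := arr ≠ []
instance (arr : List Int) : Decidable (Pre_MMSL arr) := by unfold Pre_MMSL; infer_instance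
def pvWitness_MMSL : List Int := [3, -1, 2]

def Spec_MMSL (arr : List Int) (out : String) : Prop := out = MMSL_alt arr
instance (arr : List Int) (out : String) : Decidable (Spec_MMSL arr out) := by unfold Spec_MMSL; infer_instance

-- ===== CLAIM (what is proved, stated in full; the proofs are below) =====
def Claim_equal_MMSL : Prop := ∀ (arr : List Int), Dom_MMSL arr → Pre_MMSL arr → Spec_MMSL arr (MMSL arr)

-- ===== LEMMAS AND PROOFS =====

-- A's loop body, one comparison direction at a time (c is the branch test).
def pvStep (c : Int → Int → Bool) (m : List Int) (i : Int) : List Int :=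
  if c (PySem.List.pyGetD m i 0) (PySem.List.pyGetD m (i + 1) 0)
    then m.set (i + 1).toNat (PySem.List.pyGetD m i 0) else m

-- the value A's branch leaves at position i+1
def pvOp (c : Int → Int → Bool) (x y : Int) : Int := if c x y then x else y

theorem pvGetD_set_ne {l : List Int} {i j : Nat} (v d : Int) (h : i ≠ j) :
    (l.set i v).getD j d = l.getD j d := by
  simp [List.getD, List.getElem?_set_ne h]

theorem pvGetD_set_self {l : List Int} {i : Nat} (v d : Int) (h : i < l.length) :
    (l.set i v).getD i d = v := by
  simp [List.getD, List.getElem?_set_self h]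

-- loop invariant of A's pass: after the first k iterations the list still has the same
-- length, positions above k are untouched, and position k holds the pvOp-fold of the
-- first k+1 original elements.
theorem pvLoop_inv (c : Int → Int → Bool) (a : Int) (t : List Int) (k : Nat)
    (hk : k ≤ t.length) :
    ((PySem.List.pyRange 0 (k : Int)).foldl (pvStep c) (a :: t)).length = t.length + 1 ∧
    (∀ j : Nat, k < j →
      ((PySem.List.pyRange 0 (k : Int)).foldl (pvStep c) (a :: t)).getD j 0 = (a :: t).getD j 0) ∧
    ((PySem.List.pyRange 0 (k : Int)).foldl (pvStep c) (a :: t)).getD k 0 =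
      List.foldl (pvOp c) a (t.take k) := by
  induction k with
  | zero =>
      simp [PySem.List.pyRange]
  | succ k ih =>
      have hk' : k ≤ t.length := Nat.le_of_succ_le hk
      obtain ⟨hlen, hup, hval⟩ := ih hk'
      have hkt : k < t.length := hk
      have hrange : PySem.List.pyRange 0 ((k + 1 : Nat) : Int) =
          PySem.List.pyRange 0 (k : Int) ++ [(k : Int)] := by
        have : ((k + 1 : Nat) : Int) = (k : Int) + 1 := by push_cast; ring
        rw [this, PySem.List.pyRange_one_succ_right (by positivity)]
      set L := (PySem.List.pyRange 0 (k : Int)).foldl (pvStep c) (a :: t) with hL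
      have hfold : (PySem.List.pyRange 0 ((k + 1 : Nat) : Int)).foldl (pvStep c) (a :: t) =
          pvStep c L (k : Int) := by
        rw [hrange, List.foldl_append]; rfl
      -- the two reads of the step at i = k
      have hget1 : PySem.List.pyGetD L (k : Int) 0 = List.foldl (pvOp c) a (t.take k) := by
        rw [PySem.List.pyGetD_natCast]; exact hval
      have hget2 : PySem.List.pyGetD L ((k : Int) + 1) 0 = t.getD k 0 := by
        have : ((k : Int) + 1) = ((k + 1 : Nat) : Int) := by push_cast; ring
        rw [this, PySem.List.pyGetD_natCast]
        have := hup (k + 1) (Nat.lt_succ_self k)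
        simpa using this
      have htonat : ((k : Int) + 1).toNat = k + 1 := by omega
      have htake : t.take (k + 1) = t.take k ++ [t.getD k 0] := by
        rw [List.take_add_one]
        congr 1
        rw [List.getElem?_eq_getElem hkt]
        simp [List.getD, List.getElem?_eq_getElem hkt]
      have hnewval : List.foldl (pvOp c) a (t.take (k + 1)) =
          pvOp c (List.foldl (pvOp c) a (t.take k)) (t.getD k 0) := by
        rw [htake, List.foldl_append]; rfl
      rw [hfold]
      unfold pvStep
      rw [hget1, hget2, htonat]
      by_cases hc : c (List.foldl (pvOp c) a (t.take k)) (t.getD k 0) = true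
      · simp only [hc, if_true]
        refine ⟨by simpa using hlen, ?_, ?_⟩
        · intro j hj
          rw [pvGetD_set_ne _ _ (by omega)]
          exact hup j (by omega)
        · rw [pvGetD_set_self _ _ (by omega), hnewval]
          simp only [pvOp, hc, if_true]
      · simp only [hc, Bool.false_eq_true, if_false]
        refine ⟨hlen, ?_, ?_⟩
        · intro j hj
          exact hup j (by omega)
        · have := hup (k + 1) (Nat.lt_succ_self k)
          rw [hnewval]
          simp only [pvOp, hc, Bool.false_eq_true, if_false]
          have hL1 : L.getD (k + 1) 0 = (a :: t).getD (k + 1) 0 := this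
          simpa [List.getD_cons_succ] using hL1

-- A's loop, run to the end, leaves the full pvOp-fold at the last position.
theorem pvLoop_last (c : Int → Int → Bool) (a : Int) (t : List Int) :
    ((PySem.List.pyRange 0 (t.length : Int)).foldl (pvStep c) (a :: t)).getD t.length 0 =
      List.foldl (pvOp c) a t := by
  have := (pvLoop_inv c a t t.length le_rfl).2.2
  simpa using this

theorem pvLoop_len (c : Int → Int → Bool) (a : Int) (t : List Int) :
    ((PySem.List.pyRange 0 (t.length : Int)).foldl (pvStep c) (a :: t)).length = t.length + 1 :=
  (pvLoop_inv c a t t.length le_rfl).1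

theorem pvOp_gt (a : Int) (t : List Int) :
    List.foldl (pvOp (fun x y => decide (x > y))) a t = List.foldl max a t := by
  have hfn : pvOp (fun x y => decide (x > y)) = max := by
    funext x y
    simp only [pvOp, decide_eq_true_eq]
    by_cases h : x > y
    · simp [h, max_eq_left (le_of_lt h)]
    · simp [h, max_eq_right (not_lt.mp h)]
  rw [hfn]

theorem pvOp_lt (a : Int) (t : List Int) :
    List.foldl (pvOp (fun x y => decide (x < y))) a t = List.foldl min a t := by
  have hfn : pvOp (fun x y => decide (x < y)) = min := by
    funext x y
    simp only [pvOp, decide_eq_true_eq]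
    by_cases h : x < y
    · simp [h, min_eq_left (le_of_lt h)]
    · simp [h, min_eq_right (not_lt.mp h)]
  rw [hfn]

-- the last element of sorted(a :: t) is the running maximum
theorem pvSorted_last (a : Int) (t : List Int) :
    (PySem.List.sorted (a :: t) (fun x => x)).getD t.length 0 = List.foldl max a t := by
  set s := PySem.List.sorted (a :: t) (fun x => x) with hs
  have hlen : s.length = t.length + 1 := by
    rw [hs, PySem.List.length_sorted]; simp
  have hlt : t.length < s.length := by omega
  have hmem_s : s[t.length]'hlt ∈ s := List.getElem_mem hlt
  have hmem : s[t.length]'hlt ∈ a :: t := by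
    rw [← PySem.List.mem_sorted (a :: t) (fun x => x) false]; exact hmem_s
  have hmax_mem : List.foldl max a t ∈ a :: t := List.max?_mem rfl
  have hub := PySem.List.le_foldl_max t a
  -- s[t.length] ≤ foldl max
  have h1 : s[t.length]'hlt ≤ List.foldl max a t := by
    rcases List.mem_cons.mp hmem with h | h
    · rw [h]; exact hub.1
    · exact hub.2 _ h
  -- foldl max ≤ s[t.length] : it occurs in s at some index p ≤ t.length
  have hmax_in_s : List.foldl max a t ∈ s := by
    rw [hs, PySem.List.mem_sorted]; exact hmax_mem
  obtain ⟨p, hp, hpe⟩ := List.getElem_of_mem hmax_in_s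
  have h2 : List.foldl max a t ≤ s[t.length]'hlt := by
    rw [← hpe]
    exact PySem.List.sorted_id_getElem_mono (a :: t) (by omega) (by omega)
  have := le_antisymm h1 h2
  rw [List.getD, List.getElem?_eq_getElem hlt]
  simpa using this

-- the head of sorted(a :: t) is the running minimum
theorem pvSorted_head (a : Int) (t : List Int) :
    (PySem.List.sorted (a :: t) (fun x => x)).getD 0 0 = List.foldl min a t := by
  set s := PySem.List.sorted (a :: t) (fun x => x) with hs
  have hlen : s.length = t.length + 1 := by
    rw [hs, PySem.List.length_sorted]; simp
  obtain ⟨m, t', hm⟩ : ∃ m t', s = m :: t' := by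
    cases h : s with
    | nil => rw [h] at hlen; simp at hlen
    | cons x xs => exact ⟨x, xs, rfl⟩
  have hlow := PySem.List.key_head_sorted_le (a :: t) (fun x => x) (by rw [← hs, hm])
  have hmin_mem : List.foldl min a t ∈ a :: t := List.min?_mem rfl
  have hlb := PySem.List.foldl_min_le t a
  have hm_mem : m ∈ a :: t := by
    rw [← PySem.List.mem_sorted (a :: t) (fun x => x) false, ← hs, hm]; exact List.mem_cons_self
  have h1 : m ≤ List.foldl min a t := hlow _ hmin_mem
  have h2 : List.foldl min a t ≤ m := by
    rcases List.mem_cons.mp hm_mem with h | h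
    · rw [h]; exact hlb.1
    · exact hlb.2 _ h
  rw [hm]
  simpa using le_antisymm h1 h2

-- negative index -1 on a list known to have length n+1
theorem pvGetD_neg_one_len {l : List Int} {n : Nat} (h : l.length = n + 1) :
    PySem.List.pyGetD l (-1) 0 = l.getD n 0 := by
  have hne : l ≠ [] := by intro h0; rw [h0] at h; simp at h
  rw [PySem.List.pyGetD_neg_one l 0 hne]
  rw [List.getLast_eq_getElem]
  rw [List.getD, List.getElem?_eq_getElem (by omega)]
  simp [h]

-- ===== VERDICT (by name: the statement is the Claim_ definition above) =====
theorem MMSL_spec : Claim_equal_MMSL := by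
  intro arr _ hpre
  unfold Spec_MMSL
  obtain ⟨a, t, rfl⟩ : ∃ a t, arr = a :: t := by
    cases arr with
    | nil => exact absurd rfl hpre
    | cons a t => exact ⟨a, t, rfl⟩
  unfold MMSL MMSL_alt
  simp only []
  have hcast : ((a :: t).length : Int) - 1 = (t.length : Int) := by
    simp only [List.length_cons]; push_cast; ring
  rw [hcast]
  -- split the paired fold into the two independent passes
  have hsplit :
      (PySem.List.pyRange 0 (t.length : Int)).foldl
        (fun (st : List Int × List Int) i =>
          ((if PySem.List.pyGetD st.1 i 0 > PySem.List.pyGetD st.1 (i + 1) 0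
              then st.1.set (i + 1).toNat (PySem.List.pyGetD st.1 i 0) else st.1),
           (if PySem.List.pyGetD st.2 i 0 < PySem.List.pyGetD st.2 (i + 1) 0
              then st.2.set (i + 1).toNat (PySem.List.pyGetD st.2 i 0) else st.2)))
        (a :: t, a :: t) =
      ((PySem.List.pyRange 0 (t.length : Int)).foldl (pvStep (fun x y => decide (x > y))) (a :: t),
       (PySem.List.pyRange 0 (t.length : Int)).foldl (pvStep (fun x y => decide (x < y))) (a :: t)) := by
    rw [PySem.List.foldl_prod_mk
      (fun m i => if PySem.List.pyGetD m i 0 > PySem.List.pyGetD m (i + 1) 0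
          then m.set (i + 1).toNat (PySem.List.pyGetD m i 0) else m)
      (fun m i => if PySem.List.pyGetD m i 0 < PySem.List.pyGetD m (i + 1) 0
          then m.set (i + 1).toNat (PySem.List.pyGetD m i 0) else m)]
    have h1 : (fun (m : List Int) (i : Int) =>
        if PySem.List.pyGetD m i 0 > PySem.List.pyGetD m (i + 1) 0
          then m.set (i + 1).toNat (PySem.List.pyGetD m i 0) else m) =
        pvStep (fun x y => decide (x > y)) := by
      funext m i; simp [pvStep]
    have h2 : (fun (m : List Int) (i : Int) =>
        if PySem.List.pyGetD m i 0 < PySem.List.pyGetD m (i + 1) 0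
          then m.set (i + 1).toNat (PySem.List.pyGetD m i 0) else m) =
        pvStep (fun x y => decide (x < y)) := by
      funext m i; simp [pvStep]
    rw [h1, h2]
  rw [hsplit]
  have hmaxlen := pvLoop_len (fun x y => decide (x > y)) a t
  have hminlen := pvLoop_len (fun x y => decide (x < y)) a t
  have hmax : PySem.List.pyGetD
      ((PySem.List.pyRange 0 (t.length : Int)).foldl (pvStep (fun x y => decide (x > y))) (a :: t))
      (-1) 0 = List.foldl max a t := by
    rw [pvGetD_neg_one_len hmaxlen, pvLoop_last, pvOp_gt]
  have hmin : PySem.List.pyGetD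
      ((PySem.List.pyRange 0 (t.length : Int)).foldl (pvStep (fun x y => decide (x < y))) (a :: t))
      (-1) 0 = List.foldl min a t := by
    rw [pvGetD_neg_one_len hminlen, pvLoop_last, pvOp_lt]
  have hslen : (PySem.List.sorted (a :: t) (fun x => x)).length = t.length + 1 := by
    rw [PySem.List.length_sorted]; simp
  have hsl : PySem.List.pyGetD (PySem.List.sorted (a :: t) (fun x => x)) (-1) 0 =
      List.foldl max a t := by
    rw [pvGetD_neg_one_len hslen, pvSorted_last]
  have hsh : PySem.List.pyGetD (PySem.List.sorted (a :: t) (fun x => x)) 0 0 =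
      List.foldl min a t := by
    rw [show (0 : Int) = ((0 : Nat) : Int) from rfl, PySem.List.pyGetD_natCast]
    simpa using pvSorted_head a t
  rw [hmax, hmin, hsl, hsh]
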